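-- pv_equiv track=rewrite | github.com/patrick-fitzs/Data-Science-and-Algorithms | Year 2/Data Structures and Algorithms/Week 3 : Recursion/6. Counting consecutive repeats.py | rec_reps
-- ===== SOURCE A (Python) =====
-- def rec_reps(x):
--     if x == []:
--         return 0
--     else:
--         head = x[0]
--         tail = x[1:]
--         if tail and head == tail[0]:
--             return 1+ rec_reps(tail)
--         else:
--             return rec_reps(tail)
-- ===== SOURCE B (Python) =====
-- def rec_reps(x):
--     total = 0
--     for a, b in zip(x, x[1:]):
--         if a == b:
--             total += 1
--     return total
-- ===== Notes on version B (the rewrite author's own statement) =====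
-- stated objective: faster
-- what changed: Replaced the recursion that slices the list at every step (quadratic copying, recursion-depth limited) with a single iterative pass over adjacent pairs via zip.
import Mathlib
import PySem

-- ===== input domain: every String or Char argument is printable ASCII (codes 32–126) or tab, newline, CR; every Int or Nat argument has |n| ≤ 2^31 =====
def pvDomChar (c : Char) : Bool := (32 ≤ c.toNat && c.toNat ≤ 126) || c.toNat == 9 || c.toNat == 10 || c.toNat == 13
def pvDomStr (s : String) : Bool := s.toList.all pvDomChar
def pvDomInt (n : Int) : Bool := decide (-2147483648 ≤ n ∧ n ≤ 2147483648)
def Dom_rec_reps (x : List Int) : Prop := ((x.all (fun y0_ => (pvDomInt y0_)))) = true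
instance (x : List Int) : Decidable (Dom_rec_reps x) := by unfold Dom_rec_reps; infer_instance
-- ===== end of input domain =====

-- B replaces A's slicing recursion with one iterative pass over adjacent pairs (objective: faster, O(n) vs O(n^2))

-- ===== PORT A =====
def rec_reps (x : List Int) : Int :=
  match x with
  | [] => 0
  | head :: tail =>
    if tail ≠ [] ∧ head = tail.headI then 1 + rec_reps tail
    else rec_reps tail

-- ===== PORT B =====
def rec_reps_alt (x : List Int) : Int :=
  (x.zip x.tail).foldl (fun total p => if p.1 = p.2 then total + 1 else total) 0

-- ===== PRECONDITION & SPEC =====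
def Spec_rec_reps (x : List Int) (out : Int) : Prop := out = rec_reps_alt x
instance (x : List Int) (out : Int) : Decidable (Spec_rec_reps x out) := by unfold Spec_rec_reps; infer_instance

-- ===== CLAIM (what is proved, stated in full; the proofs are below) =====
def Claim_equal_rec_reps : Prop := ∀ (x : List Int), Dom_rec_reps x → Spec_rec_reps x (rec_reps x)

-- ===== LEMMAS AND PROOFS =====

theorem rec_reps_alt_foldl_acc (l : List (Int × Int)) (a : Int) :
    l.foldl (fun total p => if p.1 = p.2 then total + 1 else total) a
      = a + l.foldl (fun total p => if p.1 = p.2 then total + 1 else total) 0 := by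
  induction l generalizing a with
  | nil => simp
  | cons p l ih =>
    simp only [List.foldl_cons]
    by_cases hh : p.1 = p.2
    · simp only [if_pos hh]
      rw [ih (a + 1), ih (0 + 1)]
      ring
    · simp only [if_neg hh]
      exact ih a

theorem rec_reps_eq (x : List Int) : rec_reps x = rec_reps_alt x := by
  induction x with
  | nil => rfl
  | cons h t ih =>
    cases t with
    | nil => rfl
    | cons h2 t2 =>
      unfold rec_reps rec_reps_alt
      by_cases hh : h = h2
      · rw [if_pos ⟨by simp, by simpa [List.headI] using hh⟩]
        rw [ih]
        unfold rec_reps_alt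
        simp only [List.tail_cons, List.zip_cons_cons, List.foldl_cons, if_pos hh]
        rw [rec_reps_alt_foldl_acc ((h2 :: t2).zip t2) (0 + 1)]
        ring
      · rw [if_neg (by simp [List.headI, hh])]
        rw [ih]
        unfold rec_reps_alt
        simp [List.tail_cons, hh]

-- ===== VERDICT (by name: the statement is the Claim_ definition above) =====
theorem rec_reps_spec : Claim_equal_rec_reps := by
  intro x _
  exact rec_reps_eq x
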